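-- pv_equiv track=rewrite | github.com/NVIDIA/Megatron-LM | megatron/core/distributed/nonuniform_tp.py | compute_uniform_tp_spares_with_parity
-- ===== SOURCE A (Python) =====
-- from typing import Dict, List, Optional, Tuple
--
-- def compute_uniform_tp_spares_with_parity(
--     faulty_gpu_map: Dict[int, List[int]], tp_base: int
-- ) -> Tuple[int, Dict[int, List[int]]]:
--     """
--     Compute uniform tp_spares across all faulty DP ranks and add additional
--     non-active ranks to achieve parity.
--
--     Strategy:
--     1. Find the maximum number of failed GPUs across all affected DP ranks
--     2. Use this as tp_spares (smallest reduced_tp that works for all)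
--     3. For DP ranks with fewer failures, pad with additional healthy GPUs
--        to reach uniform tp_spares
--
--     Args:
--         faulty_gpu_map: Mapping of DP rank -> list of failed GPU IDs
--         tp_base: Base tensor parallel size
--
--     Returns:
--         Tuple of (tp_spares, non_active_ranks_per_dp)
--         where non_active_ranks_per_dp includes both failed and padded GPUs
--
--     Example:
--         Input:  {0: [2, 5], 1: [1]}  # DP rank 0 has 2 failures, DP rank 1 has 1
--         Output: (2, {0: [2, 5], 1: [1, 7]})  # Pad DP rank 1 with GPU 7 to reach 2
--     """
--     if not faulty_gpu_map:
--         return 0, {}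
--
--     # Find maximum number of failures
--     max_failures = max(len(gpu_ids) for gpu_ids in faulty_gpu_map.values())
--     tp_spares = max_failures
--
--     non_active_ranks_per_dp = {}
--
--     for dp_rank, failed_gpus in faulty_gpu_map.items():
--         non_active = list(failed_gpus)  # Start with actually failed GPUs
--         num_to_pad = tp_spares - len(failed_gpus)
--
--         if num_to_pad > 0:
--             # Need to add more non-active ranks for parity
--             # Find healthy GPUs to mark as non-active
--             failed_set = set(failed_gpus)
--             healthy_gpus = [i for i in range(tp_base) if i not in failed_set]
--
--             # Take from the end of healthy GPUs (prefer keeping lower ranks active)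
--             gpus_to_deactivate = healthy_gpus[-num_to_pad:]
--             non_active.extend(gpus_to_deactivate)
--
--         non_active_ranks_per_dp[dp_rank] = sorted(non_active)
--
--     return tp_spares, non_active_ranks_per_dp
-- ===== SOURCE B (Python) =====
-- def compute_uniform_tp_spares_with_parity(faulty_gpu_map, tp_base):
--     # Running-max pass for tp_spares; padding by a descending early-stop scan
--     # from tp_base-1 instead of building the full healthy list and slicing it.
--     tp_spares = 0
--     for gpu_ids in faulty_gpu_map.values():
--         if len(gpu_ids) > tp_spares:
--             tp_spares = len(gpu_ids)
--
--     if not faulty_gpu_map: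
--         return 0, {}
--
--     non_active_ranks_per_dp = {}
--     for dp_rank, failed_gpus in faulty_gpu_map.items():
--         failed_set = set(failed_gpus)
--         pad = []
--         need = tp_spares - len(failed_gpus)
--         g = tp_base - 1
--         while need > 0 and g >= 0:
--             if g not in failed_set:
--                 pad.append(g)
--                 need -= 1
--             g -= 1
--         non_active_ranks_per_dp[dp_rank] = sorted(list(failed_gpus) + pad)
--
--     return tp_spares, non_active_ranks_per_dp
-- ===== Notes on version B (the rewrite author's own statement) =====
-- stated objective: alternative
-- what changed: tp_spares becomes a running-max loop instead of max() over a generator, and the padding no longer builds the full healthy list [i for i in range(tp_base) if i not in failed_set] and slices its tail: B scans GPU indices downward from tp_base-1, collecting healthy ones and stopping as soon as num_to_pad are found.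
import Mathlib
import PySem

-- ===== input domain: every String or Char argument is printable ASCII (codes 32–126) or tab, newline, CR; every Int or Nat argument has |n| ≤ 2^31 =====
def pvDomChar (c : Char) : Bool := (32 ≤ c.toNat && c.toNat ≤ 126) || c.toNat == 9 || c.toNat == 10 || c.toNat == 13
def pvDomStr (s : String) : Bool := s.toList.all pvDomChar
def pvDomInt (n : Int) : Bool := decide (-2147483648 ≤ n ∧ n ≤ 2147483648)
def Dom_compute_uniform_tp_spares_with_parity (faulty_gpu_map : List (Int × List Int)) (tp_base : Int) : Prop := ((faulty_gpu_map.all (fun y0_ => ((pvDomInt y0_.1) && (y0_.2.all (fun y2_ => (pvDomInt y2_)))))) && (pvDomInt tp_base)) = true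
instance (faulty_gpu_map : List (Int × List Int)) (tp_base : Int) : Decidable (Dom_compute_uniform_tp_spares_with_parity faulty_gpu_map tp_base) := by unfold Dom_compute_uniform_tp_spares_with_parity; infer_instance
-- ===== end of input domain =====

-- B replaces A's full healthy-list construction plus tail slice by an early-stopping
-- descending scan from tp_base-1 and a running-max pass for tp_spares (objective: alternative).

-- ===== PORT A =====
-- the body of A's per-rank loop: pad with the tail of the ascending healthy list, then sort
def pvAEntry (tp_base tp_spares : Int) (failed_gpus : List Int) : List Int :=
  let non_active := failed_gpus
  let num_to_pad := tp_spares - PySem.List.len failed_gpus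
  if num_to_pad > 0 then
    let failed_set := PySem.Set.ofList failed_gpus
    let healthy_gpus := (PySem.List.pyRange 0 tp_base 1).filter
      (fun i => !(PySem.Set.contains failed_set i))
    let gpus_to_deactivate := PySem.List.slice healthy_gpus (some (-num_to_pad)) none
    PySem.List.sorted (non_active ++ gpus_to_deactivate) (fun x => x) false
  else
    PySem.List.sorted non_active (fun x => x) false

def compute_uniform_tp_spares_with_parity (faulty_gpu_map : List (Int × List Int)) (tp_base : Int) : Int × (List (Int × List Int)) :=
  -- the Python argument is a dict: build it with dict semantics (duplicate keys overwrite in place)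
  let d := PySem.Dict.ofList faulty_gpu_map
  if d.items.isEmpty then (0, [])
  else
    let max_failures := (PySem.List.max? (d.values.map (fun gpu_ids => PySem.List.len gpu_ids)) (fun y => y)).getD 0  -- max(...); nonempty here, so getD is never taken
    let tp_spares := max_failures
    let res := d.items.foldl (fun (acc : PySem.Dict Int (List Int)) kv =>
      acc.insert kv.1 (pvAEntry tp_base tp_spares kv.2)) PySem.Dict.empty
    (tp_spares, res.items)

-- ===== PORT B =====
-- the while loop: scan g downwards, collecting healthy indices until `need` are found
def pvPadDesc (failed_set : PySem.Set Int) (g need : Int) : List Int :=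
  if h : need > 0 ∧ g ≥ 0 then
    if PySem.Set.contains failed_set g then
      pvPadDesc failed_set (g - 1) need
    else
      g :: pvPadDesc failed_set (g - 1) (need - 1)
  else []
termination_by (g + 1).toNat
decreasing_by all_goals omega

def pvBEntry (tp_base tp_spares : Int) (failed_gpus : List Int) : List Int :=
  let failed_set := PySem.Set.ofList failed_gpus
  let pad := pvPadDesc failed_set (tp_base - 1) (tp_spares - PySem.List.len failed_gpus)
  PySem.List.sorted (failed_gpus ++ pad) (fun x => x) false

def compute_uniform_tp_spares_with_parity_alt (faulty_gpu_map : List (Int × List Int)) (tp_base : Int) : Int × (List (Int × List Int)) :=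
  let d := PySem.Dict.ofList faulty_gpu_map
  let tp_spares := d.values.foldl
    (fun acc gpu_ids => if PySem.List.len gpu_ids > acc then PySem.List.len gpu_ids else acc) 0
  if d.items.isEmpty then (0, [])
  else
    let res := d.items.foldl (fun (acc : PySem.Dict Int (List Int)) kv =>
      acc.insert kv.1 (pvBEntry tp_base tp_spares kv.2)) PySem.Dict.empty
    (tp_spares, res.items)

-- ===== PRECONDITION & SPEC =====
def Spec_compute_uniform_tp_spares_with_parity (faulty_gpu_map : List (Int × List Int)) (tp_base : Int) (out : Int × (List (Int × List Int))) : Prop := out = compute_uniform_tp_spares_with_parity_alt faulty_gpu_map tp_base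
instance (faulty_gpu_map : List (Int × List Int)) (tp_base : Int) (out : Int × (List (Int × List Int))) : Decidable (Spec_compute_uniform_tp_spares_with_parity faulty_gpu_map tp_base out) := by unfold Spec_compute_uniform_tp_spares_with_parity; infer_instance

-- ===== CLAIM (what is proved, stated in full; the proofs are below) =====
def Claim_equal_compute_uniform_tp_spares_with_parity : Prop := ∀ (faulty_gpu_map : List (Int × List Int)) (tp_base : Int), Dom_compute_uniform_tp_spares_with_parity faulty_gpu_map tp_base → Spec_compute_uniform_tp_spares_with_parity faulty_gpu_map tp_base (compute_uniform_tp_spares_with_parity faulty_gpu_map tp_base)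

-- ===== LEMMAS AND PROOFS =====

-- B's descending scan produces the first `need` elements of the reversed healthy list
lemma pvPadDesc_eq_take (fs : PySem.Set Int) : ∀ (t need : Int),
    pvPadDesc fs (t - 1) need =
      (((PySem.List.pyRange 0 t 1).filter (fun i => !(PySem.Set.contains fs i))).reverse).take need.toNat := by
  intro t
  induction hn : t.toNat generalizing t with
  | zero =>
    intro need
    rw [PySem.List.pyRange_one_eq_nil (by omega)]
    rw [pvPadDesc, dif_neg (by omega)]
    simp
  | succ n ih =>
    intro need
    have hsplit : PySem.List.pyRange 0 t 1 = PySem.List.pyRange 0 (t-1) 1 ++ [t-1] := by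
      have h := PySem.List.pyRange_one_succ_right (a := 0) (b := t - 1) (by omega)
      rw [show t - 1 + 1 = t from by ring] at h
      exact h
    rw [hsplit, List.filter_append, List.reverse_append]
    by_cases hneed : need > 0
    · rw [pvPadDesc]
      rw [dif_pos (by constructor <;> omega)]
      by_cases hc : PySem.Set.contains fs (t - 1)
      · rw [if_pos hc]
        have := ih (t - 1) (by omega) need
        simp only [List.filter_singleton, hc]
        simp only [Bool.not_true]
        simpa using this
      · rw [if_neg hc]
        have := ih (t - 1) (by omega) (need - 1)
        have hc' : fs.contains (t - 1) = false := by simpa using hc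
        simp only [List.filter_singleton, hc', Bool.not_false, cond_true,
          List.reverse_singleton, List.singleton_append]
        rw [show need.toNat = (need - 1).toNat + 1 from by omega, List.take_succ_cons]
        simpa using this
    · rw [pvPadDesc, dif_neg (by omega)]
      rw [show need.toNat = 0 from by omega]
      simp

-- the running-max loop is a fold of `max`
lemma pv_runmax (rest : List (List Int)) : ∀ c : Int,
    rest.foldl (fun acc g => if PySem.List.len g > acc then PySem.List.len g else acc) c =
      rest.foldl (fun acc g => max acc (PySem.List.len g)) c := by
  induction rest with
  | nil => intro c; rfl
  | cons x xs ih =>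
    intro c
    simp only [List.foldl_cons]
    rw [show (if PySem.List.len x > c then PySem.List.len x else c) = max c (PySem.List.len x) from by
      simp only [PySem.List.len_eq]; split_ifs with h <;> omega]
    exact ih _

-- A's max(...) over the lengths equals B's running-max loop (lengths are nonnegative)
lemma pv_spares_eq (vals : List (List Int)) (h : vals ≠ []) :
    (PySem.List.max? (vals.map (fun gpu_ids => PySem.List.len gpu_ids)) (fun y => y)).getD 0 =
      vals.foldl (fun acc gpu_ids => if PySem.List.len gpu_ids > acc then PySem.List.len gpu_ids else acc) 0 := by
  obtain ⟨v, rest, rfl⟩ := List.exists_cons_of_ne_nil h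
  rw [List.map_cons, PySem.List.max?_id_cons, Option.getD_some]
  rw [List.foldl_cons, pv_runmax]
  rw [show (if PySem.List.len v > 0 then PySem.List.len v else 0) = PySem.List.len v from by
    simp only [PySem.List.len_eq]; split_ifs with h <;> omega]
  rw [List.foldl_map]

-- the two per-rank bodies agree: B's descending picks are A's tail slice, reversed,
-- and the final sort is invariant under that rearrangement
lemma pvEntry_eq (t s : Int) (f : List Int) : pvAEntry t s f = pvBEntry t s f := by
  unfold pvAEntry pvBEntry
  dsimp only
  set k := s - PySem.List.len f with hk
  set fs := PySem.Set.ofList f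
  set healthy := (PySem.List.pyRange 0 t 1).filter (fun i => !(PySem.Set.contains fs i)) with hh
  rw [pvPadDesc_eq_take fs t k]
  by_cases hkp : k > 0
  · rw [if_pos hkp]
    rw [← hh]
    rw [List.take_reverse]
    apply PySem.List.sorted_eq_sorted_of_perm _ _ _ (fun a b h => h)
    apply List.Perm.append_left
    rw [PySem.List.slice_some_none]
    rw [show -k = -((k.toNat : Nat) : Int) from by omega]
    rw [PySem.List.clampIdx_neg_natCast _ _ (by omega)]
    exact (List.reverse_perm _).symm
  · rw [if_neg hkp]
    rw [show k.toNat = 0 from by omega]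
    simp

theorem compute_uniform_tp_spares_with_parity_spec : Claim_equal_compute_uniform_tp_spares_with_parity := by
  intro faulty_gpu_map tp_base _
  unfold Spec_compute_uniform_tp_spares_with_parity
  unfold compute_uniform_tp_spares_with_parity compute_uniform_tp_spares_with_parity_alt
  dsimp only
  set d := PySem.Dict.ofList faulty_gpu_map with hd
  by_cases h : d.items.isEmpty
  · rw [if_pos h, if_pos h]
  · rw [if_neg h, if_neg h]
    have hne : d.values ≠ [] := by
      have : d.values = d.items.map Prod.snd := rfl
      rw [this]
      simp only [ne_eq, List.map_eq_nil_iff]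
      intro hc; rw [hc] at h; exact h rfl
    rw [pv_spares_eq d.values hne]
    have hfold : d.items.foldl (fun (acc : PySem.Dict Int (List Int)) kv =>
          acc.insert kv.1 (pvAEntry tp_base (d.values.foldl (fun acc gpu_ids =>
            if PySem.List.len gpu_ids > acc then PySem.List.len gpu_ids else acc) 0) kv.2)) PySem.Dict.empty
        = d.items.foldl (fun (acc : PySem.Dict Int (List Int)) kv =>
          acc.insert kv.1 (pvBEntry tp_base (d.values.foldl (fun acc gpu_ids =>
            if PySem.List.len gpu_ids > acc then PySem.List.len gpu_ids else acc) 0) kv.2)) PySem.Dict.empty :=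
      PySem.List.foldl_congr_mem _ _ _ _ (fun acc x _ => by rw [pvEntry_eq])
    rw [hfold]
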